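-- pv_equiv track=rewrite | github.com/leejihoon0312/Coding_Test | Baekjoon/문자열/Gold/Tier_4/문자열 생성(6137).py | check
-- ===== SOURCE A (Python) =====
-- def check(word_ls):
--     for order in range(int(len(word_ls) / 2)):
--         if word_ls[order] != word_ls[-(order + 1)]:
--             if word_ls[order] > word_ls[-(order + 1)]:
--                 return True, -1
--             else:
--                 return True, 0
--     return False, None
-- ===== SOURCE B (Python) =====
-- def check(word_ls):
--     rev = word_ls[::-1]
--     if word_ls == rev:
--         return False, None
--     elif word_ls > rev:
--         return True, -1
--     else:
--         return True, 0
-- ===== Notes on version B (the rewrite author's own statement) =====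
-- stated objective: simpler
-- what changed: Replaces the explicit two-pointer mirror scan over the first half with a single reverse-then-lexicographic-compare (palindrome iff list equals its reverse; otherwise the first mismatch of the mirror scan is exactly the first differing position of list vs reversed list).
import Mathlib
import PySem

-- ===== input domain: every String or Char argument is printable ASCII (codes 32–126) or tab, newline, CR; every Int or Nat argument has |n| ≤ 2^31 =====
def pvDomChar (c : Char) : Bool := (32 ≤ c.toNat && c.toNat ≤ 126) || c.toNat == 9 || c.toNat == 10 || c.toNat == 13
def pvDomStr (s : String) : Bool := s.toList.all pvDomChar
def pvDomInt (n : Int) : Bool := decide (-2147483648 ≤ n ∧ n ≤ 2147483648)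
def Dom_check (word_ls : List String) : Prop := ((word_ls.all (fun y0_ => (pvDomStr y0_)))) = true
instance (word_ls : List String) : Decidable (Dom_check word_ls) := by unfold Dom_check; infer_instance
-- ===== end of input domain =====

-- B replaces A's two-pointer mirror scan by one reverse-then-lexicographic-compare (objective: simpler).

-- ===== PORT A =====
-- Python's 's > t' on strings: lexicographic comparison of the character sequences.
def pyCharsGt : List Char → List Char → Bool
  | [], _ => false
  | _ :: _, [] => true
  | a :: as, b :: bs => if a = b then pyCharsGt as bs else decide (b < a)

def pyStrGt (s t : String) : Bool := pyCharsGt s.toList t.toList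

-- the 'for order in range(int(len(word_ls)/2))' loop with its early returns
def checkGo (word_ls : List String) (order : Nat) : Bool × Option Int :=
  if _h : order < word_ls.length / 2 then
    let x := (PySem.List.pyGet? word_ls ((order : Int))).getD ""
    let y := (PySem.List.pyGet? word_ls (-((order : Int) + 1))).getD ""
    if x ≠ y then
      if pyStrGt x y then (true, some (-1)) else (true, some 0)
    else checkGo word_ls (order + 1)
  else (false, none)
termination_by word_ls.length / 2 - order

def check (word_ls : List String) : Bool × Option Int := checkGo word_ls 0

-- ===== PORT B =====
-- Python's 'a > b' on lists of strings: lexicographic comparison, element order by pyStrGt.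
def pyListGt : List String → List String → Bool
  | [], _ => false
  | _ :: _, [] => true
  | a :: as, b :: bs => if a = b then pyListGt as bs else pyStrGt a b

def check_alt (word_ls : List String) : Bool × Option Int :=
  let rev := word_ls.reverse
  if word_ls = rev then (false, none)
  else if pyListGt word_ls rev then (true, some (-1))
  else (true, some 0)

-- ===== PRECONDITION & SPEC =====
def Spec_check (word_ls : List String) (out : Bool × Option Int) : Prop := out = check_alt word_ls
instance (word_ls : List String) (out : Bool × Option Int) : Decidable (Spec_check word_ls out) := by unfold Spec_check; infer_instance

-- ===== CLAIM (what is proved, stated in full; the proofs are below) =====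
def Claim_equal_check : Prop := ∀ (word_ls : List String), Dom_check word_ls → Spec_check word_ls (check word_ls)

-- ===== LEMMAS AND PROOFS =====

-- the reversed list, read through getD, is the mirror read of the original
lemma revGetD (ws : List String) (j : Nat) (h : j < ws.length) :
    ws.reverse.getD j "" = ws.getD (ws.length - (j + 1)) "" := by
  rw [List.getD_eq_getElem _ _ (by simpa using h),
      List.getD_eq_getElem _ _ (by omega)]
  rw [List.getElem_reverse]
  congr 1
  omega

-- mirror-match over the whole first half forces a palindrome
lemma palin (ws : List String)
    (h : ∀ j, j < ws.length / 2 → ws.getD j "" = ws.reverse.getD j "") :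
    ws = ws.reverse := by
  apply List.ext_getElem (by simp)
  intro i hi hi'
  have key : ∀ j (hj : j < ws.length / 2), ws[j]'(by omega) = ws[ws.length - (j+1)]'(by omega) := by
    intro j hj
    have := h j hj
    rwa [revGetD ws j (by omega), List.getD_eq_getElem _ _ (by omega),
        List.getD_eq_getElem _ _ (by omega)] at this
  rw [List.getElem_reverse]
  by_cases hcase : i < ws.length / 2
  · have := key i hcase
    simpa [show ws.length - (i+1) = ws.length - 1 - i by omega] using this
  · by_cases hmid : ws.length - 1 - i < ws.length / 2
    · have := key (ws.length - 1 - i) hmid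
      simpa [show ws.length - (ws.length - 1 - i + 1) = i by omega] using this.symm
    · -- middle element of an odd-length list
      have : ws.length - 1 - i = i := by omega
      simp [this]

-- first differing position decides Python's list comparison
lemma firstDiff (i : Nat) : ∀ a b : List String, a.length = b.length → i < a.length →
    (∀ j, j < i → a.getD j "" = b.getD j "") → a.getD i "" ≠ b.getD i "" →
    a ≠ b ∧ pyListGt a b = pyStrGt (a.getD i "") (b.getD i "") := by
  induction i with
  | zero =>
    intro a b hlen hi hpre hne
    match a, b, hlen, hi with
    | x :: as, y :: bs, hlen, _ =>
      simp only [List.getD_cons_zero] at hne ⊢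
      refine ⟨by simp [hne], ?_⟩
      simp [pyListGt, hne]
  | succ i ih =>
    intro a b hlen hi hpre hne
    match a, b, hlen, hi with
    | x :: as, y :: bs, hlen, hi =>
      have hxy : x = y := by simpa using hpre 0 (Nat.succ_pos _)
      simp only [List.getD_cons_succ] at hne ⊢
      obtain ⟨h1, h2⟩ := ih as bs (by simpa using hlen) (by simpa using hi)
        (fun j hj => by simpa using hpre (j+1) (by omega)) hne
      exact ⟨by simp [hxy, h1], by simp [pyListGt, hxy, h2]⟩

lemma getNeg (ws : List String) (order : Nat) (h : order + 1 ≤ ws.length) :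
    (PySem.List.pyGet? ws (-((order : Int) + 1))).getD "" = ws.getD (ws.length - (order + 1)) "" := by
  have hc : -((order : Int) + 1) = -(((order + 1 : Nat)) : Int) := by push_cast; ring
  rw [hc, PySem.List.pyGet?_neg_natCast ws (order + 1) (by omega) h]
  simp [List.getD_eq_getElem?_getD]

lemma goEq (ws : List String) : ∀ k order, ws.length / 2 - order = k → order ≤ ws.length / 2 →
    (∀ j, j < order → ws.getD j "" = ws.reverse.getD j "") →
    checkGo ws order = check_alt ws := by
  intro k
  induction k with
  | zero =>
    intro order hk hle hinv
    have horder : order = ws.length / 2 := by omega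
    rw [checkGo, dif_neg (by omega)]
    have hpal : ws = ws.reverse := palin ws (fun j hj => hinv j (by omega))
    simp [check_alt, ← hpal]
  | succ k ih =>
    intro order hk hle hinv
    have hlt : order < ws.length / 2 := by omega
    have hlen : order + 1 ≤ ws.length := by
      have := Nat.div_le_self ws.length 2; omega
    rw [checkGo, dif_pos hlt]
    simp only [PySem.List.pyGet?_natCast, getNeg ws order hlen]
    have hy : ws.getD (ws.length - (order + 1)) "" = ws.reverse.getD order "" :=
      (revGetD ws order (by omega)).symm
    rw [hy]
    have hx : (ws[order]?).getD "" = ws.getD order "" := by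
      simp [List.getD_eq_getElem?_getD]
    rw [hx]
    by_cases hne : ws.getD order "" = ws.reverse.getD order ""
    · rw [if_neg (fun hcon => hcon hne)]
      exact ih (order + 1) (by omega) (by omega) (fun j hj => by
        rcases Nat.lt_succ_iff_lt_or_eq.mp hj with hlt' | heq
        · exact hinv j hlt'
        · subst heq; exact hne)
    · obtain ⟨h1, h2⟩ := firstDiff order ws ws.reverse (by simp) (by omega) hinv hne
      rw [if_pos hne]
      simp [check_alt, h1, h2]

-- ===== VERDICT (by name: the statement is the Claim_ definition above) =====
theorem check_spec : Claim_equal_check := by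
  intro ws _
  show check ws = check_alt ws
  exact goEq ws _ 0 rfl (Nat.zero_le _) (fun j hj => absurd hj (Nat.not_lt_zero j))
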